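-- pv_equiv track=rewrite | github.com/ana-mc-almeida/1Projeto-FP | projeto_102618.py | eh_checksum
-- ===== SOURCE A (Python) =====
-- def eh_checksum(checksum):
--     '''
--     eh_checksum: string -> booleano
--
--     Retorna True caso o argumento contenha uma sequência de controlo.
--     Uma sequência de controlo é composta por letras minúsculas entre parêntesis retos.
--     '''
--     comprimento = len(checksum)
--     if type(checksum) != str or comprimento != 7 or checksum[0]!="[" or checksum[6]!="]":
--         return False
--     for i in range(1, comprimento-1):
--         if not 97 <= ord(checksum[i]) <= 122:
--             return False
--     return True
-- ===== SOURCE B (Python) =====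
-- import re
--
-- _CHECKSUM_RE = re.compile(r'\[[a-z]{5}\]')
--
-- def eh_checksum(checksum):
--     if type(checksum) != str:
--         return False
--     return _CHECKSUM_RE.fullmatch(checksum) is not None
-- ===== Notes on version B (the rewrite author's own statement) =====
-- stated objective: idiomatic
-- what changed: Replaces the manual length/bracket checks and the index-and-ord loop with a single compiled regex fullmatch that enforces length, brackets and the five ASCII lowercase letters in one engine pass.
import Mathlib
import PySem

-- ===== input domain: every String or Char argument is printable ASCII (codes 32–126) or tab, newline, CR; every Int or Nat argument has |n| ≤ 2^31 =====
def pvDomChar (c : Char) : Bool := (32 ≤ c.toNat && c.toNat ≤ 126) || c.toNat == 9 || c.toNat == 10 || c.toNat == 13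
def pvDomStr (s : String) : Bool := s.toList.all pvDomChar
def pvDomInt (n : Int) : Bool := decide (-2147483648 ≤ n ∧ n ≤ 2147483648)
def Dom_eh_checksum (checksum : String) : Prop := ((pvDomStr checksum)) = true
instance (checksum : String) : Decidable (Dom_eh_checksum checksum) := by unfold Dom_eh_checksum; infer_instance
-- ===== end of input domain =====

-- B replaces A's manual index/ord loop with a single regex fullmatch (ported as a
-- pattern match on the 7-char shape); idiomatic, same behaviour on all strings.

-- ===== PORT A =====
def eh_checksum (checksum : String) : Bool :=
  let cs := checksum.toList
  let comprimento : Int := PySem.Str.len checksum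
  if comprimento ≠ 7 ∨ PySem.List.pyGet? cs 0 ≠ some '[' ∨ PySem.List.pyGet? cs 6 ≠ some ']' then
    false
  else
    (PySem.List.pyRange 1 (comprimento - 1) 1).all (fun i =>
      decide (97 ≤ (PySem.List.pyGetD cs i ' ').toNat ∧ (PySem.List.pyGetD cs i ' ').toNat ≤ 122))

-- ===== PORT B =====
-- re.fullmatch(r'\[[a-z]{5}\]', s): exactly 7 chars, brackets, five chars in the
-- ASCII class [a-z] (codes 97..122).
def eh_checksum_alt (checksum : String) : Bool :=
  match checksum.toList with
  | ['[', a, b, c, d, e, ']'] =>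
      [a, b, c, d, e].all (fun ch => decide (97 ≤ ch.toNat ∧ ch.toNat ≤ 122))
  | _ => false

-- ===== PRECONDITION & SPEC =====
def Spec_eh_checksum (checksum : String) (out : Bool) : Prop := out = eh_checksum_alt checksum
instance (checksum : String) (out : Bool) : Decidable (Spec_eh_checksum checksum out) := by unfold Spec_eh_checksum; infer_instance

-- ===== CLAIM (what is proved, stated in full; the proofs are below) =====
def Claim_equal_eh_checksum : Prop := ∀ (checksum : String), Dom_eh_checksum checksum → Spec_eh_checksum checksum (eh_checksum checksum)

-- ===== LEMMAS AND PROOFS =====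

theorem eh_checksum_eq_alt (s : String) : eh_checksum s = eh_checksum_alt s := by
  unfold eh_checksum eh_checksum_alt
  rcases h : s.toList with _ | ⟨c0, _ | ⟨c1, _ | ⟨c2, _ | ⟨c3, _ | ⟨c4, _ | ⟨c5, _ | ⟨c6, _ | ⟨c7, rest⟩⟩⟩⟩⟩⟩⟩⟩ <;>
    simp [PySem.Str.len_eq, h, PySem.List.pyGet?, PySem.List.pyIdx?, PySem.List.pyGetD,
      show PySem.List.pyRange 1 6 1 = [1, 2, 3, 4, 5] from rfl] <;>
    first
    | rfl
    | (by_cases h0 : c0 = '[' <;> by_cases h6 : c6 = ']' <;>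
        simp [h0, h6, and_assoc])
  all_goals omega

-- ===== VERDICT (by name: the statement is the Claim_ definition above) =====
theorem eh_checksum_spec : Claim_equal_eh_checksum := by
  intro s _
  exact eh_checksum_eq_alt s
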